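-- pv_equiv track=rewrite | github.com/MrBrantCode/unitest_baseline | mut_generate/mist_train_cf/cf_69255/solution.py | compute_sum
-- ===== SOURCE A (Python) =====
-- def compute_sum(numbers):
--     """
--     This function calculates the sum of the second smallest and second largest primary (non-composite) numbers in a list.
--
--     Parameters:
--     numbers (list): A list of integers containing both positive and negative numbers.
--
--     Returns:
--     int or None: The sum of the second smallest and second largest prime numbers, or None if the list contains fewer than two prime numbers.
--     """
--
--     def is_prime(n):
--         """
--         Helper function to check if a number is prime.
--
--         Parameters:
--         n (int): The number to be checked.
--
--         Returns:
--         bool: True if the number is prime, False otherwise.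
--         """
--         if n <= 1:
--             return False
--         if n == 2:
--             return True
--         if n % 2 == 0:
--             return False
--         i = 3
--         while i * i <= n:
--             if n % i == 0:
--                 return False
--             i += 2
--         return True
--
--     primes = [x for x in numbers if x > 0 and is_prime(x)]
--     primes.sort()
--     if len(primes) >= 2:
--         second_smallest = primes[1]  # second smallest prime
--         second_largest = primes[-2]  # second largest prime
--         return second_smallest + second_largest
--     else:
--         return None
-- ===== SOURCE B (Python) =====
-- def compute_sum(numbers):
--     """Sum of the second smallest and second largest primes in the list,
--     or None if there are fewer than two primes.  Instead of sorting the
--     primes, select the extremes directly: min/remove/min gives the second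
--     smallest, max/remove/max gives the second largest."""
--
--     def is_prime(n):
--         if n <= 1:
--             return False
--         if n == 2:
--             return True
--         if n % 2 == 0:
--             return False
--         i = 3
--         while i * i <= n:
--             if n % i == 0:
--                 return False
--             i += 2
--         return True
--
--     primes = [x for x in numbers if x > 0 and is_prime(x)]
--     if len(primes) < 2:
--         return None
--     lo = min(primes)
--     rest_lo = list(primes)
--     rest_lo.remove(lo)
--     second_smallest = min(rest_lo)
--     hi = max(primes)
--     rest_hi = list(primes)
--     rest_hi.remove(hi)
--     second_largest = max(rest_hi)
--     return second_smallest + second_largest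
-- ===== Notes on version B (the rewrite author's own statement) =====
-- stated objective: alternative
-- what changed: Replaces sort-then-index with direct selection: the second smallest prime is min of the prime list with one minimum removed, the second largest is max with one maximum removed; no sorted list is ever built.
import Mathlib
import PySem

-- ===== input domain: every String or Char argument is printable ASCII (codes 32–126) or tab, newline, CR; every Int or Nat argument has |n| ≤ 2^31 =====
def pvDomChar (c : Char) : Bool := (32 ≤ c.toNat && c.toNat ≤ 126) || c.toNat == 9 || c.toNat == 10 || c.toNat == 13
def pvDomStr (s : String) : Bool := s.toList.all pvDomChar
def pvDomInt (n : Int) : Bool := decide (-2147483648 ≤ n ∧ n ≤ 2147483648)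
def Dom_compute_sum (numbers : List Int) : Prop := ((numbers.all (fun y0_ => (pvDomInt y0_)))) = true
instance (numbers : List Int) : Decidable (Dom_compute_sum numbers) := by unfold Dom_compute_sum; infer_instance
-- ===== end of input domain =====

-- B replaces A's sort-then-index with direct selection (min / remove one minimum / min, and max / remove one maximum / max); return values are proved equal on all inputs.

-- ===== PORT A =====
-- shared helper: the inner is_prime, textually identical in Source A and Source B (trial division by odd i while i*i <= n);
-- the while loop is ported with a fuel bound n.toNat, always sufficient since i starts at 3 and increases by 2.
def isPrimeLoop : Nat → Int → Int → Bool
  | 0, _, _ => true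
  | fuel+1, n, i =>
    if i * i ≤ n then
      (if PySem.Int.mod n i = 0 then false else isPrimeLoop fuel n (i + 2))
    else true

def is_prime (n : Int) : Bool :=
  if n ≤ 1 then false
  else if n = 2 then true
  else if PySem.Int.mod n 2 = 0 then false
  else isPrimeLoop n.toNat n 3

def compute_sum (numbers : List Int) : Option Int :=
  let primes := numbers.filter (fun x => decide (0 < x) && is_prime x)
  let primes := PySem.List.sorted primes (fun x => x) false
  if 2 ≤ primes.length then
    -- primes[1] and primes[-2] cannot raise here (length ≥ 2), so the none branches are unreachable
    match PySem.List.pyGet? primes 1, PySem.List.pyGet? primes (-2) with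
    | some second_smallest, some second_largest => some (second_smallest + second_largest)
    | _, _ => none
  else none

-- ===== PORT B =====
-- B's own copy of the inner is_prime (Source B defines it itself; same trial-division code)
def isPrimeLoopB : Nat → Int → Int → Bool
  | 0, _, _ => true
  | fuel+1, n, i =>
    if i * i ≤ n then
      (if PySem.Int.mod n i = 0 then false else isPrimeLoopB fuel n (i + 2))
    else true

def is_primeB (n : Int) : Bool :=
  if n ≤ 1 then false
  else if n = 2 then true
  else if PySem.Int.mod n 2 = 0 then false
  else isPrimeLoopB n.toNat n 3

def compute_sum_alt (numbers : List Int) : Option Int :=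
  let primes := numbers.filter (fun x => decide (0 < x) && is_primeB x)
  if primes.length < 2 then none
  else
    -- min/max on a list of length ≥ 2 and remove of a member cannot fail: the none branches are unreachable
    match PySem.List.min? primes (fun x => x) with
    | none => none
    | some lo =>
      match PySem.List.remove? primes lo with
      | none => none
      | some restLo =>
        match PySem.List.min? restLo (fun x => x) with
        | none => none
        | some second_smallest =>
          match PySem.List.max? primes (fun x => x) with
          | none => none
          | some hi =>
            match PySem.List.remove? primes hi with
            | none => none
            | some restHi =>
              match PySem.List.max? restHi (fun x => x) with
              | none => none
              | some second_largest => some (second_smallest + second_largest)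

-- ===== PRECONDITION & SPEC =====
def Spec_compute_sum (numbers : List Int) (out : Option Int) : Prop := out = compute_sum_alt numbers
instance (numbers : List Int) (out : Option Int) : Decidable (Spec_compute_sum numbers out) := by unfold Spec_compute_sum; infer_instance

-- ===== CLAIM (what is proved, stated in full; the proofs are below) =====
def Claim_equal_compute_sum : Prop := ∀ (numbers : List Int), Dom_compute_sum numbers → Spec_compute_sum numbers (compute_sum numbers)

-- ===== LEMMAS AND PROOFS =====

-- the two textually identical copies of is_prime compute the same function
lemma isPrimeLoopB_eq (fuel : Nat) (n i : Int) : isPrimeLoopB fuel n i = isPrimeLoop fuel n i := by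
  induction fuel generalizing i with
  | zero => rfl
  | succ f ih => simp only [isPrimeLoopB, isPrimeLoop, ih]

lemma is_primeB_eq (n : Int) : is_primeB n = is_prime n := by
  simp only [is_primeB, is_prime, isPrimeLoopB_eq]

-- min?/max? with the identity key are determined by value alone: any member bounding the whole list.
lemma min?_id_value (q : List Int) (y : Int) (hy : y ∈ q) (hb : ∀ x ∈ q, y ≤ x) :
    PySem.List.min? q (fun x => x) = some y := by
  obtain ⟨m, hm⟩ : ∃ m, PySem.List.min? q (fun x => x) = some m := by
    cases hq : q with
    | nil => rw [hq] at hy; simp at hy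
    | cons a t => exact ⟨t.foldl min a, PySem.List.min?_id_cons a t⟩
  rw [hm, le_antisymm (PySem.List.min?_isMin hm y hy) (hb m (PySem.List.min?_mem hm))]

lemma max?_id_value (q : List Int) (y : Int) (hy : y ∈ q) (hb : ∀ x ∈ q, x ≤ y) :
    PySem.List.max? q (fun x => x) = some y := by
  obtain ⟨m, hm⟩ : ∃ m, PySem.List.max? q (fun x => x) = some m := by
    cases hq : q with
    | nil => rw [hq] at hy; simp at hy
    | cons a t => exact ⟨t.foldl max a, PySem.List.max?_id_cons a t⟩
  rw [hm, le_antisymm (hb m (PySem.List.max?_mem hm)) (PySem.List.max?_isMax hm y hy)]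

lemma core (q : List Int) :
    (if 2 ≤ (PySem.List.sorted q (fun x => x) false).length then
       match PySem.List.pyGet? (PySem.List.sorted q (fun x => x) false) 1,
             PySem.List.pyGet? (PySem.List.sorted q (fun x => x) false) (-2) with
       | some a1, some a2 => some (a1 + a2)
       | _, _ => none
     else none) =
    (if q.length < 2 then none
     else
       match PySem.List.min? q (fun x => x) with
       | none => none
       | some lo =>
         match PySem.List.remove? q lo with
         | none => none
         | some restLo =>
           match PySem.List.min? restLo (fun x => x) with
           | none => none
           | some s2 =>
             match PySem.List.max? q (fun x => x) with
             | none => none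
             | some hi =>
               match PySem.List.remove? q hi with
               | none => none
               | some restHi =>
                 match PySem.List.max? restHi (fun x => x) with
                 | none => none
                 | some l2 => some (s2 + l2)) := by
  set s := PySem.List.sorted q (fun x => x) false with hs
  have hlen : s.length = q.length := PySem.List.length_sorted ..
  by_cases h2 : 2 ≤ q.length
  · rw [if_pos (by omega), if_neg (by omega)]
    have hperm : s.Perm q := PySem.List.sorted_perm _ _ _
    have hpair : s.Pairwise (fun u v : Int => u ≤ v) := by
      simpa using PySem.List.sorted_pairwise (xs := q) (key := fun x => x)
    obtain ⟨a, b, t, hse⟩ : ∃ a b t, s = a :: b :: t := by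
      match s, hlen with
      | a :: b :: t, _ => exact ⟨a, b, t, rfl⟩
      | [], h => simp at h; omega
      | [x], h => simp at h; omega
    obtain ⟨z, y, r, hre⟩ : ∃ z y r, s.reverse = z :: y :: r := by
      match hrev : s.reverse, List.length_reverse (as := s) with
      | z :: y :: r, _ => exact ⟨z, y, r, rfl⟩
      | [], h => simp at h; omega
      | [x], h => simp at h; omega
    -- order facts
    have hpc := (List.pairwise_cons.mp (hse ▸ hpair))
    have ha : ∀ x ∈ s, a ≤ x := by
      intro x hx
      rw [hse] at hx
      rcases List.mem_cons.mp hx with h | h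
      · omega
      · exact hpc.1 x h
    have hb : ∀ x ∈ b :: t, b ≤ x := by
      intro x hx
      rcases List.mem_cons.mp hx with h | h
      · omega
      · exact (List.pairwise_cons.mp hpc.2).1 x h
    have hrpair : s.reverse.Pairwise (fun u v : Int => v ≤ u) :=
      List.pairwise_reverse.mpr hpair
    have hrpc := (List.pairwise_cons.mp (hre ▸ hrpair))
    have hz : ∀ x ∈ s, x ≤ z := by
      intro x hx
      have hx' : x ∈ s.reverse := List.mem_reverse.mpr hx
      rw [hre] at hx'
      rcases List.mem_cons.mp hx' with h | h
      · omega
      · exact hrpc.1 x h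
    have hy : ∀ x ∈ y :: r, x ≤ y := by
      intro x hx
      rcases List.mem_cons.mp hx with h | h
      · omega
      · exact (List.pairwise_cons.mp hrpc.2).1 x h
    -- A side values
    have hA1 : PySem.List.pyGet? s 1 = some b := by
      rw [hse, show (1:Int) = ((1:Nat):Int) by norm_num, PySem.List.pyGet?_natCast]; rfl
    have hA2 : PySem.List.pyGet? s (-2) = some y := by
      rw [PySem.List.pyGet?_neg_ofNat s 2 (by omega) (by omega)]
      have := List.getElem?_reverse (l := s) (i := 1) (by omega)
      rw [hre] at this
      simpa [show s.length - 1 - 1 = s.length - 2 by omega] using this.symm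
    -- B side values
    have haq : a ∈ q := hperm.subset (by rw [hse]; simp)
    have hzq : z ∈ q := hperm.subset (List.mem_reverse.mp (by rw [hre]; simp))
    have hmin : PySem.List.min? q (fun x => x) = some a :=
      min?_id_value q a haq (fun x hx => ha x (hperm.mem_iff.mpr hx))
    have hmax : PySem.List.max? q (fun x => x) = some z :=
      max?_id_value q z hzq (fun x hx => hz x (hperm.mem_iff.mpr hx))
    have hrmA : PySem.List.remove? q a = some (q.erase a) :=
      PySem.List.remove?_eq_some_erase q a haq
    have hrmZ : PySem.List.remove? q z = some (q.erase z) :=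
      PySem.List.remove?_eq_some_erase q z hzq
    have hpermA : (q.erase a).Perm (b :: t) := by
      have := (hperm.erase a).symm
      rw [hse, List.erase_cons_head] at this
      exact this
    have hpermZ : (q.erase z).Perm (y :: r) := by
      have h1 : (s.reverse.erase z).Perm (s.erase z) := (List.reverse_perm s).erase z
      have h2 : (s.erase z).Perm (q.erase z) := hperm.erase z
      have h3 := (h1.trans h2).symm
      rw [hre, List.erase_cons_head] at h3
      exact h3
    have hmin2 : PySem.List.min? (q.erase a) (fun x => x) = some b :=
      min?_id_value _ b (hpermA.mem_iff.mpr (by simp))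
        (fun x hx => hb x (hpermA.mem_iff.mp hx))
    have hmax2 : PySem.List.max? (q.erase z) (fun x => x) = some y :=
      max?_id_value _ y (hpermZ.mem_iff.mpr (by simp))
        (fun x hx => hy x (hpermZ.mem_iff.mp hx))
    simp [hA1, hA2, hmin, hmax, hrmA, hrmZ, hmin2, hmax2]
  · rw [if_neg (by omega), if_pos (by omega)]

-- ===== VERDICT (by name: the statement is the Claim_ definition above) =====
theorem compute_sum_spec : Claim_equal_compute_sum := by
  intro numbers _
  unfold Spec_compute_sum compute_sum compute_sum_alt
  simp only [is_primeB_eq]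
  exact core _
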